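-- pv_equiv track=rewrite | github.com/cfrieden/bracket_test | bracket_check.py | unbalenced
-- ===== SOURCE A (Python) =====
-- from collections import deque
--
-- def unbalenced(input):
--     #python double ended queue allows for poping like a stack and a queue
--     open = deque()
--     #travse over string with index
--     for idx,c in enumerate(input):
--         #if open bracket push index onto queue
--         if c == '{':
--             open.append(idx)
--         elif c == '}':
--             # if close bracket and no stored open return idx of first unmatched close
--             if len(open) == 0:
--                 return idx
--             #else pop the matched open from right end of deque
--             open.pop()
--     #if perfectly matched deque will be empty and return -1
--     if len(open) == 0:
--         return -1
--     #else return the first unmatched open bracket (left end of deque)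
--     else :
--         return open.popleft()
-- ===== SOURCE B (Python) =====
-- def unbalenced(input):
--     # Two counter passes instead of a deque: left-to-right balance counter for
--     # the first unmatched close; right-to-left pending counter for the
--     # leftmost unmatched open.
--     s = list(input)
--     bal = 0
--     for idx, c in enumerate(s):
--         if c == '}':
--             if bal == 0:
--                 return idx
--             bal -= 1
--         elif c == '{':
--             bal += 1
--     if bal == 0:
--         return -1
--     pending = 0
--     cand = -1
--     for j in range(len(s) - 1, -1, -1):
--         c = s[j]
--         if c == '}':
--             pending += 1
--         elif c == '{':
--             if pending > 0:
--                 pending -= 1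
--             else:
--                 cand = j
--     return cand
-- ===== Notes on version B (the rewrite author's own statement) =====
-- stated objective: alternative
-- what changed: Replaces the deque of open-bracket indices with two plain integer-counter passes: a balance counter left-to-right for the first unmatched close, and a pending-close counter right-to-left that finds the leftmost unmatched open, so no stack is ever stored.
import Mathlib
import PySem

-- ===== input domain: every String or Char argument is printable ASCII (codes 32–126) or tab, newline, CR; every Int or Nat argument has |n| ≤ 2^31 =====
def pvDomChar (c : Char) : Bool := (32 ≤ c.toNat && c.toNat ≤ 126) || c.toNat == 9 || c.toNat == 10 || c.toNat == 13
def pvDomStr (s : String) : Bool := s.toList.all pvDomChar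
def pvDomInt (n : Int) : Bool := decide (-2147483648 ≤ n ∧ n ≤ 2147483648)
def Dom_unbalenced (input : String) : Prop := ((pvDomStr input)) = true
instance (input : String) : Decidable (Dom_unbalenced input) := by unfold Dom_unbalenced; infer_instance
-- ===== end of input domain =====

-- B replaces A's deque of open-bracket indices by two integer-counter passes
-- (balance left-to-right, pending-close right-to-left); same O(n) time, no stack.

-- ===== PORT A =====
def goA (cs : List Char) (idx : Int) (stack : List Int) : Int :=
  match cs with
  | [] =>
    match stack with
    | [] => -1
    | x :: _ => x
  | c :: rest =>
    if c = '{' then goA rest (idx + 1) (stack ++ [idx])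
    else if c = '}' then
      if stack.length = 0 then idx
      else goA rest (idx + 1) stack.dropLast
    else goA rest (idx + 1) stack

def unbalenced (input : String) : Int := goA input.toList 0 []

-- ===== PORT B =====
-- pass 1: left-to-right balance counter; .inl idx = early return, .inr bal = loop done
def goB1 (cs : List Char) (idx bal : Int) : Sum Int Int :=
  match cs with
  | [] => .inr bal
  | c :: rest =>
    if c = '}' then
      if bal = 0 then .inl idx else goB1 rest (idx + 1) (bal - 1)
    else if c = '{' then goB1 rest (idx + 1) (bal + 1)
    else goB1 rest (idx + 1) bal

-- pass 2: the right-to-left `for j in range(len(s)-1,-1,-1)` loop as structural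
-- recursion (later positions are processed in the recursive call first);
-- state = (pending, cand)
def goB2 (cs : List Char) (j : Int) : Int × Int :=
  match cs with
  | [] => (0, -1)
  | c :: rest =>
    let r := goB2 rest (j + 1)
    if c = '}' then (r.1 + 1, r.2)
    else if c = '{' then (if 0 < r.1 then (r.1 - 1, r.2) else (r.1, j))
    else r

def unbalenced_alt (input : String) : Int :=
  match goB1 input.toList 0 0 with
  | .inl i => i
  | .inr bal => if bal = 0 then -1 else (goB2 input.toList 0).2

-- ===== PRECONDITION & SPEC =====
def Spec_unbalenced (input : String) (out : Int) : Prop := out = unbalenced_alt input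
instance (input : String) (out : Int) : Decidable (Spec_unbalenced input out) := by unfold Spec_unbalenced; infer_instance

-- ===== CLAIM (what is proved, stated in full; the proofs are below) =====
def Claim_equal_unbalenced : Prop := ∀ (input : String), Dom_unbalenced input → Spec_unbalenced input (unbalenced input)

-- ===== LEMMAS AND PROOFS =====

-- proof-side combinator: what A's run amounts to, given the two pass results,
-- the initial stack length and the initial stack head (defaulted to the candidate)
def comb (g : Sum Int Int) (r : Int × Int) (len hd : Int) : Int :=
  match g with
  | .inl i => i
  | .inr _ => if r.1 < len then hd else r.2

theorem comb_inl (i : Int) (r : Int × Int) (len hd : Int) :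
    comb (.inl i) r len hd = i := rfl

theorem comb_inr (b : Int) (r : Int × Int) (len hd : Int) :
    comb (.inr b) r len hd = if r.1 < len then hd else r.2 := rfl

-- pending counter of pass 2 is never negative
theorem goB2_pend_nonneg (cs : List Char) (j : Int) : 0 ≤ (goB2 cs j).1 := by
  induction cs generalizing j with
  | nil => simp [goB2]
  | cons c rest ih =>
    have h := ih (j + 1)
    simp only [goB2]
    split_ifs <;> simp <;> omega

-- MAIN INVARIANT: A's recursion, for any starting stack, is determined by the
-- two counter passes.
theorem goA_eq (cs : List Char) (idx : Int) (stack : List Int) :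
    goA cs idx stack =
      comb (goB1 cs idx (stack.length : Int)) (goB2 cs idx)
        (stack.length : Int) (stack.headD (goB2 cs idx).2) := by
  induction cs generalizing idx stack with
  | nil =>
    cases stack with
    | nil => simp [goA, goB1, goB2, comb]
    | cons x t => simp [goA, goB1, goB2, comb]
  | cons c rest ih =>
    have hp := goB2_pend_nonneg rest (idx + 1)
    by_cases hopen : c = '{'
    · have hcl : ¬ c = '}' := by simp [hopen]
      have h := ih (idx + 1) (stack ++ [idx])
      simp only [goA, goB1, goB2, if_pos hopen, if_neg hcl] at h ⊢
      rw [h]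
      have hlen : (((stack ++ [idx]).length : Nat) : Int) = (stack.length : Int) + 1 := by
        simp
      have hhd : ∀ d : Int, (stack ++ [idx]).headD d = stack.headD idx := by
        cases stack <;> simp
      rw [hlen, hhd]
      cases hg : goB1 rest (idx + 1) ((stack.length : Int) + 1) with
      | inl i => rw [comb_inl, comb_inl]
      | inr b =>
        rw [comb_inr, comb_inr]
        by_cases hpos : 0 < (goB2 rest (idx + 1)).1
        · rw [if_pos hpos]
          simp only []
          by_cases hlt : (goB2 rest (idx + 1)).1 - 1 < (stack.length : Int)
          · rw [if_pos hlt,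
              if_pos (by omega : (goB2 rest (idx + 1)).1 < (stack.length : Int) + 1)]
            cases stack with
            | nil => simp at hlt; omega
            | cons x t => simp
          · rw [if_neg hlt,
              if_neg (by omega : ¬ (goB2 rest (idx + 1)).1 < (stack.length : Int) + 1)]
        · rw [if_neg hpos]
          simp only []
          rw [if_pos (by omega : (goB2 rest (idx + 1)).1 < (stack.length : Int) + 1)]
          cases stack with
          | nil =>
            rw [if_neg (by simp; omega :
              ¬ (goB2 rest (idx + 1)).1 < ((List.length ([] : List Int) : Nat) : Int))]
            simp
          | cons x t =>
            rw [if_pos (by simp; omega :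
              (goB2 rest (idx + 1)).1 < (((x :: t).length : Nat) : Int))]
    · by_cases hclose : c = '}'
      · cases stack with
        | nil =>
          simp [goA, goB1, comb, hclose]
        | cons x t =>
          have hlen0 : ¬ ((x :: t).length = 0) := by simp
          have hbal0 : ¬ ((((x :: t).length : Nat) : Int) = 0) := by omega
          have h := ih (idx + 1) ((x :: t).dropLast)
          simp only [goA, goB1, goB2, if_neg hopen, if_pos hclose, if_neg hlen0,
            if_neg hbal0] at h ⊢
          rw [h]
          have hdl : (((x :: t).dropLast.length : Nat) : Int) = (((x :: t).length : Nat) : Int) - 1 := by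
            simp [List.length_dropLast]
          rw [hdl]
          cases hg : goB1 rest (idx + 1) ((((x :: t).length : Nat) : Int) - 1) with
          | inl i => rw [comb_inl, comb_inl]
          | inr b =>
            rw [comb_inr, comb_inr]
            simp only []
            by_cases hlt : (goB2 rest (idx + 1)).1 + 1 < (((x :: t).length : Nat) : Int)
            · rw [if_pos hlt,
                if_pos (by omega : (goB2 rest (idx + 1)).1 < (((x :: t).length : Nat) : Int) - 1)]
              cases t with
              | nil => simp at hlt; omega
              | cons y t' => simp
            · rw [if_neg hlt,
                if_neg (by omega : ¬ (goB2 rest (idx + 1)).1 < (((x :: t).length : Nat) : Int) - 1)]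
      · have h := ih (idx + 1) stack
        simp only [goA, goB1, goB2, if_neg hopen, if_neg hclose] at h ⊢
        rw [h]

-- pass-1 / pass-2 bookkeeping: if pass 1 finishes (no early return) from a
-- nonnegative balance b, then pending ≤ b, b - pending ≤ final balance, and
-- final balance = b - pending forces cand = -1 (no unmatched open at all)
theorem goB1_inr (cs : List Char) (idx b bal : Int) (hb : 0 ≤ b)
    (h : goB1 cs idx b = .inr bal) :
    (goB2 cs idx).1 ≤ b ∧ b - (goB2 cs idx).1 ≤ bal ∧
      (bal = b - (goB2 cs idx).1 → (goB2 cs idx).2 = -1) := by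
  induction cs generalizing idx b with
  | nil =>
    simp only [goB1] at h
    cases h
    simp [goB2]; omega
  | cons c rest ih =>
    have hp := goB2_pend_nonneg rest (idx + 1)
    by_cases hclose : c = '}'
    · simp only [goB1, goB2, if_pos hclose] at h ⊢
      by_cases hb0 : b = 0
      · rw [if_pos hb0] at h; cases h
      · rw [if_neg hb0] at h
        have := ih (idx + 1) (b - 1) (by omega) h
        omega
    · by_cases hopen : c = '{'
      · simp only [goB1, goB2, if_neg hclose, if_pos hopen] at h ⊢
        have := ih (idx + 1) (b + 1) (by omega) h
        by_cases hpos : 0 < (goB2 rest (idx + 1)).1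
        · rw [if_pos hpos]; simp only []; omega
        · rw [if_neg hpos]; simp only []
          refine ⟨by omega, by omega, ?_⟩
          intro hEq; omega
      · simp only [goB1, goB2, if_neg hopen, if_neg hclose] at h ⊢
        exact ih (idx + 1) b hb h

-- ===== VERDICT (by name: the statement is the Claim_ definition above) =====
theorem unbalenced_spec : Claim_equal_unbalenced := by
  intro input _
  unfold Spec_unbalenced unbalenced unbalenced_alt
  have h := goA_eq input.toList 0 []
  simp only [List.length_nil, Nat.cast_zero, List.headD] at h
  rw [h]
  cases hg : goB1 input.toList 0 0 with
  | inl i => rw [comb_inl]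
  | inr bal =>
    rw [comb_inr]
    show _ = if bal = 0 then (-1 : Int) else (goB2 input.toList 0).2
    have hp := goB2_pend_nonneg input.toList 0
    rw [if_neg (by omega : ¬ (goB2 input.toList 0).1 < (0 : Int))]
    by_cases hbal : bal = 0
    · have := goB1_inr input.toList 0 0 bal (by omega) hg
      have hc : (goB2 input.toList 0).2 = -1 := this.2.2 (by omega)
      rw [if_pos hbal, hc]
    · rw [if_neg hbal]
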